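-- pv_equiv track=rewrite | github.com/raquelal94/NestedShapley | src/NestedShapley.py | create_Ci_list
-- ===== SOURCE A (Python) =====
-- def create_Ci_list(layers, special_layer=None, special_children=None):
--     # Initialize variables
--     current_index = 1  # Keeps track of the last node index assigned
--     tree_structure = []
--     parent_nodes = [1]  # Start with the root node
--
--     # Generate the tree
--     for layer_index, children_count in enumerate(layers):
--         new_parent_nodes = []  # Prepare to track the next layer of parent nodes
--         for parent_index, parent in enumerate(parent_nodes):
--             # Check if the current layer and node are special
--             if special_layer is not None and layer_index == special_layer:
--                 if special_children and parent_index < len(special_children):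
--                     # Use the special number of children for this node
--                     children_count = special_children[parent_index]
--                 else:
--                     # Use the default number of children for the rest of the nodes in this layer
--                     children_count = layers[layer_index]
--
--             # The children of the current node start at current_index + 1
--             children_start = current_index + 1
--             children_end = children_start + children_count
--
--             # Add the children range to the tree structure if children_count is not zero
--             if children_count > 0:
--                 tree_structure.append(list(range(children_start, children_end)))
--                 # Update the current_index to the last child added
--                 current_index = children_end - 1
--                 # Add the new children to the list of parent nodes for the next layer
--                 new_parent_nodes.extend(range(children_start, children_end))
--             else:
--                 # For nodes with no children, add an empty list
--                 tree_structure.append([])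
--
--         # Update parent nodes for the next layer
--         parent_nodes = new_parent_nodes
--
--     return tree_structure
-- ===== SOURCE B (Python) =====
-- def create_Ci_list(layers, special_layer=None, special_children=None):
--     # Pass 1: flat BFS-ordered list of per-node child counts.
--     counts = []
--     num_parents = 1
--     for layer_index, default_count in enumerate(layers):
--         if special_layer is not None and layer_index == special_layer:
--             layer_counts = [
--                 special_children[parent_index]
--                 if special_children and parent_index < len(special_children)
--                 else default_count
--                 for parent_index in range(num_parents)
--             ]
--         else:
--             layer_counts = [default_count] * num_parents
--         counts.extend(layer_counts)
--         num_parents = sum(c for c in layer_counts if c > 0)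
--     # Pass 2: cumulative offset over the counts -> child-index ranges.
--     result = []
--     offset = 1
--     for c in counts:
--         if c > 0:
--             result.append(list(range(offset + 1, offset + c + 1)))
--             offset += c
--         else:
--             result.append([])
--     return result
-- ===== Notes on version B (the rewrite author's own statement) =====
-- stated objective: alternative
-- what changed: B replaces A's BFS that materialises explicit parent-node index lists with two flat passes: pass 1 computes a BFS-ordered list of per-node child counts (tracking only the number of parents per layer), pass 2 turns the counts into child-index ranges with a single cumulative offset.
import Mathlib
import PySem

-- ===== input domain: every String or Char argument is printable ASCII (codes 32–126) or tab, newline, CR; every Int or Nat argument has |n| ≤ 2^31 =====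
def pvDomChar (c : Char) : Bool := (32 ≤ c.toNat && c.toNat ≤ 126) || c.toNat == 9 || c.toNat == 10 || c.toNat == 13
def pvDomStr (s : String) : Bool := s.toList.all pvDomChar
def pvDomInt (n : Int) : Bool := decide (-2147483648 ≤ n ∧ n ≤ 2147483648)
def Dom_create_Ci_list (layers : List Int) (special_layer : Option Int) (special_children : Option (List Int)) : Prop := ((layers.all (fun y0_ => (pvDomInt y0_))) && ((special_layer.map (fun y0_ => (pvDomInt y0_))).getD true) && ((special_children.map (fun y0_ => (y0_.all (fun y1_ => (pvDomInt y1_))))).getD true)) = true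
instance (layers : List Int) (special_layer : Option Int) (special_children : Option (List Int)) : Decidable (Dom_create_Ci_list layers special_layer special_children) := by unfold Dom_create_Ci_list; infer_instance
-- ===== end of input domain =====

-- B builds a flat list of per-node child counts first and then turns it into ranges with one
-- cumulative-offset pass, instead of A's BFS that materialises the actual parent-node index lists
-- (objective: alternative decomposition; same exact return value).

-- ===== PORT A =====
-- A's loop state: (children_count, current_index, tree_structure, new_parent_nodes)
def create_Ci_list (layers : List Int) (special_layer : Option Int) (special_children : Option (List Int)) : List (List Int) :=
  let fin := (PySem.List.enumerate layers).foldl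
    (fun (st : Int × List (List Int) × List Int) lp =>
      let layer_index := lp.1
      let inner := (PySem.List.enumerate st.2.2).foldl
        (fun (t : Int × Int × List (List Int) × List Int) pp =>
          let parent_index := pp.1
          let children_count :=
            match special_layer with
            | some sl =>
              if layer_index = sl then
                match special_children with
                | some scl =>
                  if scl ≠ [] ∧ parent_index < (scl.length : Int) then
                    (PySem.List.pyGet? scl parent_index).getD 0  -- index from enumerate, always in range
                  else
                    (PySem.List.pyGet? layers layer_index).getD 0  -- index from enumerate, always in range
                | none => (PySem.List.pyGet? layers layer_index).getD 0
              else t.1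
            | none => t.1
          let children_start := t.2.1 + 1
          let children_end := children_start + children_count
          if children_count > 0 then
            (children_count, children_end - 1,
             t.2.2.1 ++ [PySem.List.pyRange children_start children_end 1],
             t.2.2.2 ++ PySem.List.pyRange children_start children_end 1)
          else
            (children_count, t.2.1, t.2.2.1 ++ [[]], t.2.2.2))
        (lp.2, st.1, st.2.1, ([] : List Int))
      (inner.2.1, inner.2.2.1, inner.2.2.2))
    (1, ([] : List (List Int)), ([1] : List Int))
  fin.2.1

-- ===== PORT B =====
-- Pass 1: (counts, num_parents); Pass 2: (result, offset) over counts.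
def create_Ci_list_alt (layers : List Int) (special_layer : Option Int) (special_children : Option (List Int)) : List (List Int) :=
  let p1 := (PySem.List.enumerate layers).foldl
    (fun (st : List Int × Int) lp =>
      let layer_index := lp.1
      let default_count := lp.2
      let layer_counts :=
        match special_layer with
        | some sl =>
          if layer_index = sl then
            (PySem.List.pyRange 0 st.2 1).map (fun parent_index =>
              match special_children with
              | some scl =>
                if scl ≠ [] ∧ parent_index < (scl.length : Int) then
                  (PySem.List.pyGet? scl parent_index).getD 0  -- index from range(num_parents), in range
                else default_count
              | none => default_count)
          else List.replicate st.2.toNat default_count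
        | none => List.replicate st.2.toNat default_count
      (st.1 ++ layer_counts, (layer_counts.filter (fun c => decide (0 < c))).sum))
    (([] : List Int), 1)
  (p1.1.foldl
    (fun (r : List (List Int) × Int) c =>
      if c > 0 then (r.1 ++ [PySem.List.pyRange (r.2 + 1) (r.2 + c + 1) 1], r.2 + c)
      else (r.1 ++ [[]], r.2))
    (([] : List (List Int)), 1)).1

-- ===== PRECONDITION & SPEC =====
def Spec_create_Ci_list (layers : List Int) (special_layer : Option Int) (special_children : Option (List Int)) (out : List (List Int)) : Prop := out = create_Ci_list_alt layers special_layer special_children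
instance (layers : List Int) (special_layer : Option Int) (special_children : Option (List Int)) (out : List (List Int)) : Decidable (Spec_create_Ci_list layers special_layer special_children out) := by unfold Spec_create_Ci_list; infer_instance

-- ===== CLAIM (what is proved, stated in full; the proofs are below) =====
def Claim_equal_create_Ci_list : Prop := ∀ (layers : List Int) (special_layer : Option Int) (special_children : Option (List Int)), Dom_create_Ci_list layers special_layer special_children → Spec_create_Ci_list layers special_layer special_children (create_Ci_list layers special_layer special_children)

-- ===== LEMMAS AND PROOFS =====

def pvStep2 (r : List (List Int) × Int) (c : Int) : List (List Int) × Int :=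
  if c > 0 then (r.1 ++ [PySem.List.pyRange (r.2 + 1) (r.2 + c + 1) 1], r.2 + c)
  else (r.1 ++ [[]], r.2)
def pvCnt (layers : List Int) (special_layer : Option Int) (special_children : Option (List Int))
    (li dc i : Int) : Int :=
  match special_layer with
  | some sl =>
    if li = sl then
      match special_children with
      | some scl =>
        if scl ≠ [] ∧ i < (scl.length : Int) then (PySem.List.pyGet? scl i).getD 0
        else (PySem.List.pyGet? layers li).getD 0
      | none => (PySem.List.pyGet? layers li).getD 0
    else dc
  | none => dc
def pvKids (ci : Int) : List Int → List Int
  | [] => []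
  | c :: cs => if c > 0 then PySem.List.pyRange (ci + 1) (ci + c + 1) 1 ++ pvKids (ci + c) cs
               else pvKids ci cs
def pvBody (layers : List Int) (sl? : Option Int) (sc? : Option (List Int)) (li : Int)
    (t : Int × Int × List (List Int) × List Int) (pp : Int × Int) :
    Int × Int × List (List Int) × List Int :=
  let c := pvCnt layers sl? sc? li t.1 pp.1
  if c > 0 then
    (c, t.2.1 + c, t.2.2.1 ++ [PySem.List.pyRange (t.2.1 + 1) (t.2.1 + c + 1) 1],
     t.2.2.2 ++ PySem.List.pyRange (t.2.1 + 1) (t.2.1 + c + 1) 1)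
  else (c, t.2.1, t.2.2.1 ++ [[]], t.2.2.2)
def pvOutA (layers : List Int) (sl? : Option Int) (sc? : Option (List Int)) :
    (Int × List (List Int) × List Int) → (Int × Int) → Int × List (List Int) × List Int :=
  (fun (st : Int × List (List Int) × List Int) lp =>
      let layer_index := lp.1
      let inner := (PySem.List.enumerate st.2.2).foldl
        (fun (t : Int × Int × List (List Int) × List Int) (pp : Int × Int) =>
          let parent_index := pp.1
          let children_count :=
            match sl? with
            | some sl =>
              if layer_index = sl then
                match sc? with
                | some scl =>
                  if scl ≠ [] ∧ parent_index < (scl.length : Int) then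
                    (PySem.List.pyGet? scl parent_index).getD 0
                  else
                    (PySem.List.pyGet? layers layer_index).getD 0
                | none => (PySem.List.pyGet? layers layer_index).getD 0
              else t.1
            | none => t.1
          let children_start := t.2.1 + 1
          let children_end := children_start + children_count
          if children_count > 0 then
            (children_count, children_end - 1,
             t.2.2.1 ++ [PySem.List.pyRange children_start children_end 1],
             t.2.2.2 ++ PySem.List.pyRange children_start children_end 1)
          else
            (children_count, t.2.1, t.2.2.1 ++ [[]], t.2.2.2))
        (lp.2, st.1, st.2.1, ([] : List Int))
      (inner.2.1, inner.2.2.1, inner.2.2.2))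

def pvOutB (_layers : List Int) (sl? : Option Int) (sc? : Option (List Int)) :
    (List Int × Int) → (Int × Int) → List Int × Int :=
  (fun (st : List Int × Int) lp =>
      let layer_index := lp.1
      let default_count := lp.2
      let layer_counts :=
        match sl? with
        | some sl =>
          if layer_index = sl then
            (PySem.List.pyRange 0 st.2 1).map (fun parent_index =>
              match sc? with
              | some scl =>
                if scl ≠ [] ∧ parent_index < (scl.length : Int) then
                  (PySem.List.pyGet? scl parent_index).getD 0
                else default_count
              | none => default_count)
          else List.replicate st.2.toNat default_count
        | none => List.replicate st.2.toNat default_count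
      (st.1 ++ layer_counts, (layer_counts.filter (fun c => decide (0 < c))).sum))

theorem pvKids_length (ci : Int) (cs : List Int) :
    ((pvKids ci cs).length : Int) = (cs.filter (fun c => decide (0 < c))).sum := by
  induction cs generalizing ci with
  | nil => simp [pvKids]
  | cons c cs ih =>
    by_cases h : c > 0
    · simp [pvKids, h, PySem.List.length_pyRange_one, ih]
      omega
    · simp [pvKids, h, ih]

theorem pvCnt_carry (layers : List Int) (sl? : Option Int) (sc? : Option (List Int)) (li dc s i : Int) :
    pvCnt layers sl? sc? li (pvCnt layers sl? sc? li dc s) i = pvCnt layers sl? sc? li dc i := by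
  unfold pvCnt
  cases sl? with
  | none => rfl
  | some sl => by_cases h : li = sl <;> simp [h]

theorem pvBody_eq (layers : List Int) (sl? : Option Int) (sc? : Option (List Int)) (li : Int) :
    (fun (t : Int × Int × List (List Int) × List Int) (pp : Int × Int) =>
          let parent_index := pp.1
          let children_count :=
            match sl? with
            | some sl =>
              if li = sl then
                match sc? with
                | some scl =>
                  if scl ≠ [] ∧ parent_index < (scl.length : Int) then
                    (PySem.List.pyGet? scl parent_index).getD 0
                  else
                    (PySem.List.pyGet? layers li).getD 0
                | none => (PySem.List.pyGet? layers li).getD 0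
              else t.1
            | none => t.1
          let children_start := t.2.1 + 1
          let children_end := children_start + children_count
          if children_count > 0 then
            (children_count, children_end - 1,
             t.2.2.1 ++ [PySem.List.pyRange children_start children_end 1],
             t.2.2.2 ++ PySem.List.pyRange children_start children_end 1)
          else
            (children_count, t.2.1, t.2.2.1 ++ [[]], t.2.2.2)) = pvBody layers sl? sc? li := by
  funext t pp
  show (if (pvCnt layers sl? sc? li t.1 pp.1) > 0 then
          (pvCnt layers sl? sc? li t.1 pp.1, t.2.1 + 1 + pvCnt layers sl? sc? li t.1 pp.1 - 1,
           t.2.2.1 ++ [PySem.List.pyRange (t.2.1 + 1) (t.2.1 + 1 + pvCnt layers sl? sc? li t.1 pp.1) 1],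
           t.2.2.2 ++ PySem.List.pyRange (t.2.1 + 1) (t.2.1 + 1 + pvCnt layers sl? sc? li t.1 pp.1) 1)
        else (pvCnt layers sl? sc? li t.1 pp.1, t.2.1, t.2.2.1 ++ [[]], t.2.2.2))
      = pvBody layers sl? sc? li t pp
  simp only [pvBody]
  generalize pvCnt layers sl? sc? li t.1 pp.1 = c
  split
  · have h2 : t.2.1 + 1 + c = t.2.1 + c + 1 := by ring
    rw [h2]
    simp
  · rfl

theorem pvInnerA_aux (layers : List Int) (sl? : Option Int) (sc? : Option (List Int)) (li : Int) :
    ∀ (parents : List Int) (s : Int) (dc ci : Int) (tree : List (List Int)) (nps : List Int),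
    ((PySem.List.enumerate parents s).foldl (pvBody layers sl? sc? li) (dc, ci, tree, nps)).2 =
      ((((PySem.List.pyRange s (s + parents.length) 1).map (pvCnt layers sl? sc? li dc)).foldl pvStep2 (tree, ci)).2,
       (((PySem.List.pyRange s (s + parents.length) 1).map (pvCnt layers sl? sc? li dc)).foldl pvStep2 (tree, ci)).1,
       nps ++ pvKids ci ((PySem.List.pyRange s (s + parents.length) 1).map (pvCnt layers sl? sc? li dc))) := by
  intro parents
  induction parents with
  | nil =>
    intro s dc ci tree nps
    simp [PySem.List.enumerate_nil, pvKids]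
  | cons p ps ih =>
    intro s dc ci tree nps
    have hcons : PySem.List.pyRange s (s + ((ps.length + 1 : Nat) : Int)) 1
        = s :: PySem.List.pyRange (s+1) ((s+1) + (ps.length : Int)) 1 := by
      rw [PySem.List.pyRange_one_cons (by push_cast; omega)]
      congr 1
      push_cast; ring_nf
    rw [PySem.List.enumerate_cons, List.foldl_cons]
    simp only [List.length_cons, hcons, List.map_cons, List.foldl_cons]
    have hfun : pvCnt layers sl? sc? li (pvCnt layers sl? sc? li dc s)
        = pvCnt layers sl? sc? li dc := by
      funext i; exact pvCnt_carry layers sl? sc? li dc s i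
    by_cases hpos : pvCnt layers sl? sc? li dc s > 0
    · have hb : pvBody layers sl? sc? li (dc, ci, tree, nps) (s, p)
          = (pvCnt layers sl? sc? li dc s, ci + pvCnt layers sl? sc? li dc s,
             tree ++ [PySem.List.pyRange (ci + 1) (ci + pvCnt layers sl? sc? li dc s + 1) 1],
             nps ++ PySem.List.pyRange (ci + 1) (ci + pvCnt layers sl? sc? li dc s + 1) 1) := by
        simp only [pvBody]
        rw [if_pos hpos]
      rw [hb, ih, hfun]
      simp only [pvStep2, if_pos hpos, pvKids, List.append_assoc]
    · have hb : pvBody layers sl? sc? li (dc, ci, tree, nps) (s, p)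
          = (pvCnt layers sl? sc? li dc s, ci, tree ++ [[]], nps) := by
        simp only [pvBody]
        rw [if_neg hpos]
      rw [hb, ih, hfun]
      simp only [pvStep2, if_neg hpos, pvKids]


theorem pvOutA_step (layers : List Int) (sl? : Option Int) (sc? : Option (List Int))
    (ci : Int) (tree : List (List Int)) (parents : List Int) (s dc np : Int)
    (hnp : (parents.length : Int) = np) :
    pvOutA layers sl? sc? (ci, tree, parents) (s, dc)
    = ((((PySem.List.pyRange 0 np 1).map (pvCnt layers sl? sc? s dc)).foldl pvStep2 (tree, ci)).2,
       (((PySem.List.pyRange 0 np 1).map (pvCnt layers sl? sc? s dc)).foldl pvStep2 (tree, ci)).1,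
       pvKids ci ((PySem.List.pyRange 0 np 1).map (pvCnt layers sl? sc? s dc))) := by
  dsimp only [pvOutA]
  rw [pvBody_eq layers sl? sc? s]
  rw [pvInnerA_aux layers sl? sc? s parents 0 dc ci tree []]
  rw [show (0:Int) + (parents.length : Int) = np from by omega]
  simp

theorem pvOutB_step (layers : List Int) (sl? : Option Int) (sc? : Option (List Int))
    (counts : List Int) (np : Int) (s dc : Int)
    (hget : PySem.List.pyGet? layers s = some dc) :
    pvOutB layers sl? sc? (counts, np) (s, dc)
    = (counts ++ (PySem.List.pyRange 0 np 1).map (pvCnt layers sl? sc? s dc),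
       (((PySem.List.pyRange 0 np 1).map (pvCnt layers sl? sc? s dc)).filter (fun c => decide (0 < c))).sum) := by
  dsimp only [pvOutB]
  refine congrArg (fun z : List Int => (counts ++ z, (z.filter (fun c => decide (0 < c))).sum)) ?_
  cases sl? with
  | none =>
    show List.replicate np.toNat dc = _
    rw [show (pvCnt layers none sc? s dc) = (fun (_ : Int) => dc) from funext fun i => rfl,
        List.map_const', PySem.List.length_pyRange_one]
    norm_num
  | some sl =>
    show (if s = sl then _ else List.replicate np.toNat dc) = _
    by_cases h : s = sl
    · rw [if_pos h]
      refine (List.map_congr_left ?_)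
      intro i hi
      subst h
      cases sc? with
      | none => simp [pvCnt, hget]
      | some scl =>
        by_cases hc : scl ≠ [] ∧ i < (scl.length : Int)
        · simp [pvCnt, hc]
        · simp [pvCnt, hc, hget]
    · rw [if_neg h]
      rw [show (pvCnt layers (some sl) sc? s dc) = (fun (_ : Int) => dc) from
            funext fun i => by simp [pvCnt, h],
          List.map_const', PySem.List.length_pyRange_one]
      norm_num

theorem pvOuter (layers : List Int) (sl? : Option Int) (sc? : Option (List Int)) :
    ∀ (rem : List Int) (s : Int) (ci : Int) (tree : List (List Int)) (parents : List Int)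
      (counts : List Int) (np : Int),
    (∀ p ∈ PySem.List.enumerate rem s, PySem.List.pyGet? layers p.1 = some p.2) →
    ((parents.length : Int) = np) →
    ((tree, ci) = counts.foldl pvStep2 (([] : List (List Int)), 1)) →
    ((((PySem.List.enumerate rem s).foldl (pvOutA layers sl? sc?) (ci, tree, parents)).2.1,
      ((PySem.List.enumerate rem s).foldl (pvOutA layers sl? sc?) (ci, tree, parents)).1)
      = ((PySem.List.enumerate rem s).foldl (pvOutB layers sl? sc?) (counts, np)).1.foldl pvStep2 (([] : List (List Int)), 1) ∧
     ((((PySem.List.enumerate rem s).foldl (pvOutA layers sl? sc?) (ci, tree, parents)).2.2.length : Int)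
      = ((PySem.List.enumerate rem s).foldl (pvOutB layers sl? sc?) (counts, np)).2)) := by
  intro rem
  induction rem with
  | nil =>
    intro s ci tree parents counts np H hnp hinv
    simp only [PySem.List.enumerate_nil, List.foldl_nil]
    exact ⟨hinv, hnp⟩
  | cons dc rem ih =>
    intro s ci tree parents counts np H hnp hinv
    have hget : PySem.List.pyGet? layers s = some dc :=
      H (s, dc) (by rw [PySem.List.enumerate_cons]; exact List.mem_cons_self ..)
    have H' : ∀ p ∈ PySem.List.enumerate rem (s+1), PySem.List.pyGet? layers p.1 = some p.2 :=
      fun p hp => H p (by rw [PySem.List.enumerate_cons]; exact List.mem_cons_of_mem _ hp)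
    rw [PySem.List.enumerate_cons, List.foldl_cons, List.foldl_cons,
        pvOutA_step layers sl? sc? ci tree parents s dc np hnp,
        pvOutB_step layers sl? sc? counts np s dc hget]
    exact ih (s+1) _ _ _ _ _ H' (by rw [pvKids_length]) (by rw [List.foldl_append, ← hinv])

theorem portA_eq (layers : List Int) (sl? : Option Int) (sc? : Option (List Int)) :
    create_Ci_list layers sl? sc?
    = ((PySem.List.enumerate layers).foldl (pvOutA layers sl? sc?) (1, ([] : List (List Int)), ([1] : List Int))).2.1 := rfl

theorem portB_eq (layers : List Int) (sl? : Option Int) (sc? : Option (List Int)) :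
    create_Ci_list_alt layers sl? sc?
    = (((PySem.List.enumerate layers).foldl (pvOutB layers sl? sc?) (([] : List Int), 1)).1.foldl pvStep2 (([] : List (List Int)), 1)).1 := rfl

theorem pvEnum_pyGet {α : Type} (pre xs : List α) :
    ∀ p ∈ PySem.List.enumerate xs (pre.length : Int), PySem.List.pyGet? (pre ++ xs) p.1 = some p.2 := by
  induction xs generalizing pre with
  | nil => simp [PySem.List.enumerate_nil]
  | cons x xs ih =>
    intro p hp
    rw [PySem.List.enumerate_cons] at hp
    rcases List.mem_cons.mp hp with hp | hp
    · subst hp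
      simp
    · have h1 : ((pre.length : Int) + 1) = ((pre ++ [x]).length : Int) := by simp
      have h2 : pre ++ x :: xs = (pre ++ [x]) ++ xs := by simp
      rw [h2]
      exact ih (pre ++ [x]) p (by rw [← h1]; exact hp)

-- ===== VERDICT (by name: the statement is the Claim_ definition above) =====
theorem create_Ci_list_spec : Claim_equal_create_Ci_list := by
  intro layers sl? sc? _
  unfold Spec_create_Ci_list
  have H0 : ∀ p ∈ PySem.List.enumerate layers (0 : Int), PySem.List.pyGet? layers p.1 = some p.2 := by
    have := pvEnum_pyGet ([] : List Int) layers
    simpa using this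
  have h := pvOuter layers sl? sc? layers 0 1 ([] : List (List Int)) ([1] : List Int) ([] : List Int) 1
      H0 (by simp) rfl
  rw [portA_eq, portB_eq]
  exact congrArg Prod.fst h.1
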